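-- pv_equiv track=rewrite | github.com/Charanreddyy44/Leetcode-DSA | 1256-rank-transform-of-an-array/rank-transform-of-an-array.py | arrayRankTransform
-- ===== SOURCE A (Python) =====
-- from typing import List
--
-- def arrayRankTransform(arr: List[int]) -> List[int]:
--     sorted_nums = sorted(arr)
--     ranks = {}
--     rank = 1
--     for x in sorted_nums:
--         if x not in ranks:
--             ranks[x] = rank
--             rank += 1
--     result = []
--     for x in arr:
--         result.append(ranks[x])
--     return result
-- ===== SOURCE B (Python) =====
-- from typing import List
--
--
-- def arrayRankTransform(arr: List[int]) -> List[int]: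
--     uniq = sorted(set(arr))
--
--     def bisect_left(a, x):
--         lo, hi = 0, len(a)
--         while lo < hi:
--             mid = (lo + hi) // 2
--             if a[mid] < x:
--                 lo = mid + 1
--             else:
--                 hi = mid
--         return lo
--
--     return [bisect_left(uniq, x) + 1 for x in arr]
-- ===== Notes on version B (the rewrite author's own statement) =====
-- stated objective: alternative
-- what changed: Replaces A's rank dictionary (built by a pass over the sorted list, then a lookup loop) with a sorted list of distinct values and a hand-written bisect_left binary search per element; no dict is built at all.
import Mathlib
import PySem

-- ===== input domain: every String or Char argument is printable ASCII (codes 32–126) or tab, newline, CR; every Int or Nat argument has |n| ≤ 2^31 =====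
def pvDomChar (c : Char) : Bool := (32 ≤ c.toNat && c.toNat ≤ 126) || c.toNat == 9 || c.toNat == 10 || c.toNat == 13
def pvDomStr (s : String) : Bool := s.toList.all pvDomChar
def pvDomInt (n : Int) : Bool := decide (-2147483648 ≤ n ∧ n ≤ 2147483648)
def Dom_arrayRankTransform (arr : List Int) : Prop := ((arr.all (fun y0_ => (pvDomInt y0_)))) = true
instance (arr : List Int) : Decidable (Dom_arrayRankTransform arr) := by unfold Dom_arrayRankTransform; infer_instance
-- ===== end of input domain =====

-- B replaces A's rank dictionary with a sorted distinct-value list queried by a hand-written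
-- binary search (bisect_left); same results, a genuinely different lookup structure (objective: alternative).


-- ===== PORT A =====
def arrayRankTransform (arr : List Int) : List Int :=
  let sorted_nums := PySem.List.sorted arr (fun x => x) false
  let st := sorted_nums.foldl
    (fun (st : PySem.Dict Int Int × Int) x =>
      if st.1.contains x = false then (st.1.insert x st.2, st.2 + 1) else st)
    (PySem.Dict.empty, 1)
  -- ranks[x]: every x of arr occurs in sorted_nums hence is a key, so the .getD 0 default is never taken
  arr.foldl (fun result x => result ++ [(st.1.get? x).getD 0]) []

-- ===== PORT B =====
-- hand-written bisect_left loop of Source B; a[mid] is always in range, so the .getD 0 default is never taken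
def pvBisectLoop (a : List Int) (x : Int) (lo hi : Int) : Int :=
  if h : lo < hi then
    let mid := PySem.Int.floordiv (lo + hi) 2
    if (PySem.List.pyGet? a mid).getD 0 < x then pvBisectLoop a x (mid + 1) hi
    else pvBisectLoop a x lo mid
  else lo
termination_by (hi - lo).toNat
decreasing_by
  · have h1 := (PySem.Int.le_floordiv_iff_mul_le (a := lo + hi) (b := 2) (q := lo) (by omega)).mpr (by omega)
    omega
  · have h2 := (PySem.Int.floordiv_lt_iff_lt_mul (a := lo + hi) (b := 2) (q := hi) (by omega)).mpr (by omega)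
    omega

def arrayRankTransform_alt (arr : List Int) : List Int :=
  let uniq := PySem.List.sorted (PySem.Set.ofList arr) (fun x => x) false
  arr.map (fun x => pvBisectLoop uniq x 0 (uniq.length : Int) + 1)

-- ===== PRECONDITION & SPEC =====
def Spec_arrayRankTransform (arr : List Int) (out : List Int) : Prop := out = arrayRankTransform_alt arr
instance (arr : List Int) (out : List Int) : Decidable (Spec_arrayRankTransform arr out) := by unfold Spec_arrayRankTransform; infer_instance

-- ===== CLAIM (what is proved, stated in full; the proofs are below) =====
def Claim_equal_arrayRankTransform : Prop := ∀ (arr : List Int), Dom_arrayRankTransform arr → Spec_arrayRankTransform arr (arrayRankTransform arr)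

-- ===== LEMMAS AND PROOFS =====

-- the append-accumulator loop of A's second pass is a map
theorem pv_foldl_append_map (l : List Int) (g : Int → Int) (acc : List Int) :
    l.foldl (fun res x => res ++ [g x]) acc = acc ++ l.map g := by
  induction l generalizing acc with
  | nil => simp
  | cons y ys ih => simp [List.foldl_cons, ih]

-- in a ≤-sorted list, the elements < x are exactly the first countP-many positions
theorem pv_sorted_lt_iff (x : Int) : ∀ (a : List Int), a.Pairwise (· ≤ ·) →
    ∀ i, (hi : i < a.length) → (a[i] < x ↔ i < a.countP (fun y => y < x)) := by
  intro a
  induction a with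
  | nil => intro _ i hi; simp at hi
  | cons y ys ih =>
    intro hp i hi
    have hy : ∀ z ∈ ys, y ≤ z := fun z hz => (List.pairwise_cons.mp hp).1 z hz
    have hp' := (List.pairwise_cons.mp hp).2
    have hcnt : (y :: ys).countP (fun y => y < x) =
        ys.countP (fun y => y < x) + (if y < x then 1 else 0) := by
      simp [List.countP_cons]
    cases i with
    | zero =>
      simp only [List.getElem_cons_zero]
      rw [hcnt]
      by_cases hcase : y < x
      · exact iff_of_true hcase (by rw [if_pos hcase]; omega)
      · have hzero : ys.countP (fun y => y < x) = 0 := by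
          rw [List.countP_eq_zero]
          intro z hz
          have := hy z hz
          simp only [decide_eq_true_eq]
          omega
        exact iff_of_false hcase (by rw [if_neg hcase]; omega)
    | succ j =>
      simp only [List.getElem_cons_succ]
      rw [hcnt]
      have hj : j < ys.length := by simpa using hi
      have hIH := ih hp' j hj
      by_cases hcase : y < x
      · rw [if_pos hcase]
        omega
      · have hzero : ys.countP (fun y => y < x) = 0 := by
          rw [List.countP_eq_zero]
          intro z hz
          have h1 := hy z hz
          simp only [decide_eq_true_eq]
          omega
        have hzy : ¬ ys[j] < x := by
          have := hy ys[j] (List.getElem_mem hj)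
          omega
        rw [if_neg hcase]
        omega

-- binary-search invariant: if the answer lies in [lo, hi], the loop finds it
theorem pv_bisect_eq (a : List Int) (x : Int) (ha : a.Pairwise (· ≤ ·)) :
    ∀ (n : Nat) (lo hi : Int), (hi - lo).toNat = n → 0 ≤ lo → hi ≤ (a.length : Int) →
    lo ≤ (a.countP (fun y => y < x) : Int) → (a.countP (fun y => y < x) : Int) ≤ hi →
    pvBisectLoop a x lo hi = (a.countP (fun y => y < x) : Int) := by
  intro n
  induction n using Nat.strong_induction_on with
  | _ n IH =>
    intro lo hi hn h0 hlen hlo hhi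
    rw [pvBisectLoop]
    by_cases h : lo < hi
    · simp only [h, dite_true]
      have hmidlo : lo ≤ PySem.Int.floordiv (lo + hi) 2 :=
        (PySem.Int.le_floordiv_iff_mul_le (by omega)).mpr (by omega)
      have hmidhi : PySem.Int.floordiv (lo + hi) 2 < hi :=
        (PySem.Int.floordiv_lt_iff_lt_mul (by omega)).mpr (by omega)
      set mid := PySem.Int.floordiv (lo + hi) 2 with hmid
      have hmrange : mid.toNat < a.length := by omega
      have hget : PySem.List.pyGet? a mid = some a[mid.toNat] :=
        PySem.List.pyGet?_eq_some_getElem _ (by omega) (by omega)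
      rw [hget]
      have hiff := pv_sorted_lt_iff x a ha mid.toNat hmrange
      by_cases hcmp : a[mid.toNat] < x
      · have hc : mid.toNat < a.countP (fun y => y < x) := hiff.mp hcmp
        simp only [hcmp, Option.getD_some, if_true]
        exact IH (hi - (mid + 1)).toNat (by omega) (mid + 1) hi rfl (by omega) hlen (by omega) hhi
      · have hc : ¬ mid.toNat < a.countP (fun y => y < x) := fun hc => hcmp (hiff.mpr hc)
        simp only [hcmp, Option.getD_some, if_false]
        exact IH (mid - lo).toNat (by omega) lo mid rfl h0 (by omega) hlo (by omega)
    · simp only [h, dite_false]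
      omega

-- A's dict-building fold: every key of the result is mapped to 1 + (number of keys below it)
theorem pv_foldA : ∀ (s : List Int) (d : PySem.Dict Int Int) (r : Int)
    (st : PySem.Dict Int Int × Int),
    st = s.foldl (fun (st : PySem.Dict Int Int × Int) x =>
        if st.1.contains x = false then (st.1.insert x st.2, st.2 + 1) else st) (d, r) →
    s.Pairwise (· ≤ ·) →
    (∀ k ∈ d.keys, ∀ b ∈ s, k ≤ b) →
    (∀ k ∈ d.keys, d.get? k = some (1 + (d.keys.countP (fun y => y < k) : Int))) →
    d.keys.Nodup →
    r = 1 + (d.keys.length : Int) →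
    (∀ k, k ∈ st.1.keys ↔ k ∈ d.keys ∨ k ∈ s) ∧ st.1.keys.Nodup ∧
      (∀ k ∈ st.1.keys, st.1.get? k = some (1 + (st.1.keys.countP (fun y => y < k) : Int))) := by
  intro s
  induction s with
  | nil =>
    intro d r st hst _ _ hget hnd _
    subst hst
    exact ⟨by simp, hnd, hget⟩
  | cons z s ih =>
    intro d r st hst hp hle hget hnd hr
    have hz : ∀ b ∈ s, z ≤ b := fun b hb => (List.pairwise_cons.mp hp).1 b hb
    have hp' := (List.pairwise_cons.mp hp).2
    simp only [List.foldl_cons] at hst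
    cases hcb : d.contains z with
    | false =>
      -- new key: insert z with rank r
      rw [if_pos hcb] at hst
      have hznot : z ∉ d.keys := by
        intro hm
        have h2 := (PySem.Dict.contains_iff_mem_keys d z).mpr hm
        rw [hcb] at h2
        simp at h2
      have hkeys : (d.insert z r).keys = d.keys ++ [z] :=
        PySem.Dict.keys_insert_of_not_contains d r hcb
      have hlez : ∀ k ∈ d.keys, k ≤ z := fun k hk => hle k hk z (by simp)
      have hcount : d.keys.countP (fun y => y < z) = d.keys.length := by
        rw [List.countP_eq_length]
        intro k hk
        have h1 := hlez k hk
        have h2 : k ≠ z := fun he => hznot (he ▸ hk)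
        simp only [decide_eq_true_eq]
        omega
      have hmain := ih (d.insert z r) (r + 1) st hst hp'
        (by
          intro k hk b hb
          rw [hkeys] at hk
          rcases List.mem_append.mp hk with hk | hk
          · exact hle k hk b (by simp [hb])
          · simp at hk; subst hk; exact hz b hb)
        (by
          intro k hk
          rw [hkeys] at hk
          rcases List.mem_append.mp hk with hk | hk
          · have hne : k ≠ z := fun he => hznot (he ▸ hk)
            rw [PySem.Dict.get?_insert_of_ne d r hne, hget k hk, hkeys]
            have hnlt : ¬ z < k := by have := hlez k hk; omega
            simp [List.countP_append, hnlt]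
          · simp at hk; subst hk
            rw [PySem.Dict.get?_insert_self, hkeys]
            simp [List.countP_append, hcount, hr])
        (by
          rw [hkeys]
          refine List.Nodup.append hnd (List.nodup_singleton z) ?_
          intro a ha hb
          simp at hb
          subst hb
          exact hznot ha)
        (by rw [hkeys, hr]; simp only [List.length_append, List.length_singleton]; push_cast; ring)
      refine ⟨?_, hmain.2.1, hmain.2.2⟩
      intro k
      rw [hmain.1 k, hkeys]
      simp only [List.mem_append, List.mem_cons]
      tauto
    | true =>
      -- z already a key: state unchanged
      rw [if_neg (by simp [hcb])] at hst
      have hzin : z ∈ d.keys := (PySem.Dict.contains_iff_mem_keys d z).mp hcb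
      have hmain := ih d r st hst hp'
        (fun k hk b hb => hle k hk b (by simp [hb])) hget hnd hr
      refine ⟨?_, hmain.2.1, hmain.2.2⟩
      intro k
      rw [hmain.1 k]
      simp only [List.mem_cons]
      constructor
      · rintro (h | h)
        · exact Or.inl h
        · exact Or.inr (Or.inr h)
      · rintro (h | h | h)
        · exact Or.inl h
        · subst h; exact Or.inl hzin
        · exact Or.inr h

-- ===== VERDICT (by name: the statement is the Claim_ definition above) =====
theorem arrayRankTransform_spec : Claim_equal_arrayRankTransform := by
  intro arr _
  unfold Spec_arrayRankTransform arrayRankTransform arrayRankTransform_alt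
  set s := PySem.List.sorted arr (fun x => x) false with hs
  set u := PySem.List.sorted (PySem.Set.ofList arr) (fun x => x) false with hu
  have hsp : s.Pairwise (· ≤ ·) := PySem.List.sorted_pairwise arr (fun x => x)
  have hup : u.Pairwise (· ≤ ·) := PySem.List.sorted_pairwise _ (fun x => x)
  have hsmem : ∀ k : Int, k ∈ s ↔ k ∈ arr := fun k => PySem.List.mem_sorted arr (fun x => x) false k
  have humem : ∀ k : Int, k ∈ u ↔ k ∈ arr := by
    intro k
    rw [PySem.List.mem_sorted, PySem.Set.mem_ofList]
  have hund : u.Nodup :=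
    ((PySem.List.sorted_perm (PySem.Set.ofList arr) (fun x => x) false).nodup_iff).mpr
      (PySem.Set.nodup_ofList arr)
  set st := s.foldl (fun (st : PySem.Dict Int Int × Int) x =>
      if st.1.contains x = false then (st.1.insert x st.2, st.2 + 1) else st)
      (PySem.Dict.empty, 1) with hst
  obtain ⟨hkeysmem, hkeysnd, hgets⟩ :=
    pv_foldA s PySem.Dict.empty 1 st hst hsp (by simp) (by simp) (by simp) (by simp)
  have hperm : st.1.keys.Perm u := by
    rw [List.perm_ext_iff_of_nodup hkeysnd hund]
    intro k
    rw [hkeysmem k, humem k, hsmem k]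
    simp
  rw [pv_foldl_append_map]
  simp only [List.nil_append]
  apply List.map_congr_left
  intro x hx
  have hxk : x ∈ st.1.keys := by rw [hkeysmem x]; right; exact (hsmem x).mpr hx
  rw [hgets x hxk]
  have hcnt : st.1.keys.countP (fun y => y < x) = u.countP (fun y => y < x) :=
    hperm.countP_eq _
  have hb := pv_bisect_eq u x hup ((u.length : Int) - 0).toNat 0 (u.length : Int) rfl
    (by omega) (le_refl _)
    (by exact_mod_cast Int.natCast_nonneg _)
    (by exact_mod_cast Int.ofNat_le.mpr List.countP_le_length)
  rw [hb, hcnt]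
  simp only [Option.getD_some]
  omega
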